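-- pv_equiv track=rewrite | github.com/swayz032/aspire-backend | orchestrator/src/aspire_orchestrator/providers/pandadoc_client.py | _build_missing_token_questions
-- ===== SOURCE A (Python) =====
-- def _humanize_token_name(token_name: str) -> str:
--     """Convert PandaDoc token name to human-readable label.
--
--     "Client.FirstName" → "client's first name"
--     "Sender.Address" → "your business address"
--     """
--     mapping = {
--         "Sender.Company": "your company name",
--         "Sender.FirstName": "your first name",
--         "Sender.LastName": "your last name",
--         "Sender.Email": "your email",
--         "Sender.State": "your state",
--         "Sender.Address": "your business address",
--         "Sender.Phone": "your phone number",
--         "Client.Company": "the other party's company name",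
--         "Client.FirstName": "the contact person's first name",
--         "Client.LastName": "the contact person's last name",
--         "Client.Email": "the contact person's email",
--         "Client.State": "the other party's state",
--         "Client.Address": "the other party's address",
--         "Client.Phone": "the other party's phone number",
--     }
--     return mapping.get(token_name, token_name.replace(".", " ").lower())
--
-- def _build_missing_token_questions(missing: list[str]) -> list[str]:
--     """Build targeted questions for Ava to ask the user about missing tokens.
--
--     Groups related tokens into natural questions instead of asking one-by-one.
--     This is the FALLBACK — used when LLM-powered analysis is unavailable.
--     """
--     questions: list[str] = []
--
--     # Group: sender personal info
--     sender_person = [t for t in missing if t in ("Sender.FirstName", "Sender.LastName")]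
--     if sender_person:
--         questions.append("What is your full name (for the sender fields on the document)?")
--
--     # Group: sender business info
--     sender_biz = [t for t in missing if t in ("Sender.Company", "Sender.Address", "Sender.State", "Sender.Phone",
--                                                 "Sender.City", "Sender.Zip", "Sender.StreetAddress")]
--     if sender_biz:
--         fields = [_humanize_token_name(t) for t in sender_biz]
--         questions.append(
--             f"I need {', '.join(fields)}. "
--             f"Should I use your business profile info, or would you like to provide different details?"
--         )
--
--     # Group: sender email
--     if "Sender.Email" in missing:
--         questions.append("What email address should appear on the document for you?")
--
--     # Group: client personal info
--     client_person = [t for t in missing if t in ("Client.FirstName", "Client.LastName")]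
--     if client_person:
--         questions.append("Who is the contact person (signer) at the other company?")
--
--     # Group: client business info
--     client_biz = [t for t in missing if t in ("Client.Company", "Client.Address", "Client.State", "Client.Phone",
--                                                "Client.City", "Client.Zip", "Client.StreetAddress")]
--     if client_biz:
--         fields = [_humanize_token_name(t) for t in client_biz]
--         questions.append(f"I also need the other party's: {', '.join(fields)}.")
--
--     # Group: client email
--     if "Client.Email" in missing:
--         questions.append("What is the other party's email address?")
--
--     # Any remaining unmatched tokens
--     handled = set(sender_person + sender_biz + client_person + client_biz)
--     handled.update({"Sender.Email", "Client.Email"})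
--     for t in missing:
--         if t not in handled and not t.startswith("Document."):
--             questions.append(f"What value should go in the '{t}' field?")
--
--     return questions
-- ===== SOURCE B (Python) =====
-- # Single-pass re-implementation: classify each token once via a static table,
-- # then emit questions in the fixed group order.
--
-- _Q_SENDER_PERSON = "What is your full name (for the sender fields on the document)?"
-- _Q_SENDER_EMAIL = "What email address should appear on the document for you?"
-- _Q_CLIENT_PERSON = "Who is the contact person (signer) at the other company?"
-- _Q_CLIENT_EMAIL = "What is the other party's email address?"
--
-- # token -> (bucket, human label); labels for the two "fields" groups are precomputed.
-- _TOKEN_INFO = {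
--     "Sender.FirstName": ("sp", None),
--     "Sender.LastName": ("sp", None),
--     "Sender.Company": ("sb", "your company name"),
--     "Sender.Address": ("sb", "your business address"),
--     "Sender.State": ("sb", "your state"),
--     "Sender.Phone": ("sb", "your phone number"),
--     "Sender.City": ("sb", "sender city"),
--     "Sender.Zip": ("sb", "sender zip"),
--     "Sender.StreetAddress": ("sb", "sender streetaddress"),
--     "Sender.Email": ("se", None),
--     "Client.FirstName": ("cp", None),
--     "Client.LastName": ("cp", None),
--     "Client.Company": ("cb", "the other party's company name"),
--     "Client.Address": ("cb", "the other party's address"),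
--     "Client.State": ("cb", "the other party's state"),
--     "Client.Phone": ("cb", "the other party's phone number"),
--     "Client.City": ("cb", "client city"),
--     "Client.Zip": ("cb", "client zip"),
--     "Client.StreetAddress": ("cb", "client streetaddress"),
--     "Client.Email": ("ce", None),
-- }
--
--
-- def _build_missing_token_questions(missing: list[str]) -> list[str]:
--     sp = se = cp = ce = False
--     sb_labels: list[str] = []
--     cb_labels: list[str] = []
--     leftovers: list[str] = []
--     for t in missing:
--         info = _TOKEN_INFO.get(t)
--         if info is None:
--             if not t.startswith("Document."):
--                 leftovers.append(f"What value should go in the '{t}' field?")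
--         else:
--             bucket, label = info
--             if bucket == "sp":
--                 sp = True
--             elif bucket == "sb":
--                 sb_labels.append(label)
--             elif bucket == "se":
--                 se = True
--             elif bucket == "cp":
--                 cp = True
--             elif bucket == "cb":
--                 cb_labels.append(label)
--             else:
--                 ce = True
--     questions: list[str] = []
--     if sp:
--         questions.append(_Q_SENDER_PERSON)
--     if sb_labels:
--         questions.append(
--             f"I need {', '.join(sb_labels)}. "
--             f"Should I use your business profile info, or would you like to provide different details?"
--         )
--     if se:
--         questions.append(_Q_SENDER_EMAIL)
--     if cp:
--         questions.append(_Q_CLIENT_PERSON)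
--     if cb_labels:
--         questions.append(f"I also need the other party's: {', '.join(cb_labels)}.")
--     if ce:
--         questions.append(_Q_CLIENT_EMAIL)
--     return questions + leftovers
-- ===== Notes on version B (the rewrite author's own statement) =====
-- stated objective: simpler
-- what changed: B replaces A's six separate re-scans of `missing` (four filtering comprehensions, two membership tests) plus the final handled-set reconciliation with a single pass that classifies each token through one static table into bucket lists/flags/leftovers, then emits the questions in the same fixed order.
import Mathlib
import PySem

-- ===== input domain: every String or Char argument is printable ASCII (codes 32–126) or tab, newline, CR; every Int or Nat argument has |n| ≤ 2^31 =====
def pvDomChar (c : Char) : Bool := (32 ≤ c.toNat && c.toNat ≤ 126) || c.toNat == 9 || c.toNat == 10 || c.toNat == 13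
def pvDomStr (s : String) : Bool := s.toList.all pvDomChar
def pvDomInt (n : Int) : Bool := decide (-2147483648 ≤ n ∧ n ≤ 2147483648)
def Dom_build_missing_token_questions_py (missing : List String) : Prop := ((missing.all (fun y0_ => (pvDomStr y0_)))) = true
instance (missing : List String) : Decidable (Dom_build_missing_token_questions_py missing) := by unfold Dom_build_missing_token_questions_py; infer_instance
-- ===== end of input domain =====

-- B replaces A's six re-scanning comprehensions plus the handled-set reconciliation with ONE pass over
-- `missing` that classifies each token via a static table; objective: simpler (single traversal).

-- ===== PORT A =====
def humanizeMapping : PySem.Dict String String := PySem.Dict.ofList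
  [("Sender.Company", "your company name"),
   ("Sender.FirstName", "your first name"),
   ("Sender.LastName", "your last name"),
   ("Sender.Email", "your email"),
   ("Sender.State", "your state"),
   ("Sender.Address", "your business address"),
   ("Sender.Phone", "your phone number"),
   ("Client.Company", "the other party's company name"),
   ("Client.FirstName", "the contact person's first name"),
   ("Client.LastName", "the contact person's last name"),
   ("Client.Email", "the contact person's email"),
   ("Client.State", "the other party's state"),
   ("Client.Address", "the other party's address"),
   ("Client.Phone", "the other party's phone number")]

def humanize_token_name_py (token_name : String) : String :=
  PySem.Dict.getD humanizeMapping token_name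
    (PySem.Str.lower (PySem.Str.replace token_name "." " "))

def build_missing_token_questions_py (missing : List String) : List String :=
  let questions : List String := []
  let sender_person := missing.filter (fun t => t == "Sender.FirstName" || t == "Sender.LastName")
  let questions := if sender_person.isEmpty then questions else
    questions ++ ["What is your full name (for the sender fields on the document)?"]
  let sender_biz := missing.filter (fun t => t == "Sender.Company" || t == "Sender.Address" ||
    t == "Sender.State" || t == "Sender.Phone" || t == "Sender.City" || t == "Sender.Zip" ||
    t == "Sender.StreetAddress")
  let questions := if sender_biz.isEmpty then questions else
    let fields := sender_biz.map humanize_token_name_py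
    questions ++ ["I need " ++ PySem.Str.join ", " fields ++ ". Should I use your business profile info, or would you like to provide different details?"]
  let questions := if missing.contains "Sender.Email" then
    questions ++ ["What email address should appear on the document for you?"] else questions
  let client_person := missing.filter (fun t => t == "Client.FirstName" || t == "Client.LastName")
  let questions := if client_person.isEmpty then questions else
    questions ++ ["Who is the contact person (signer) at the other company?"]
  let client_biz := missing.filter (fun t => t == "Client.Company" || t == "Client.Address" ||
    t == "Client.State" || t == "Client.Phone" || t == "Client.City" || t == "Client.Zip" ||
    t == "Client.StreetAddress")
  let questions := if client_biz.isEmpty then questions else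
    let fields := client_biz.map humanize_token_name_py
    questions ++ ["I also need the other party's: " ++ PySem.Str.join ", " fields ++ "."]
  let questions := if missing.contains "Client.Email" then
    questions ++ ["What is the other party's email address?"] else questions
  let handled : PySem.Set String :=
    PySem.Set.update (PySem.Set.ofList (sender_person ++ sender_biz ++ client_person ++ client_biz))
      ["Sender.Email", "Client.Email"]
  missing.foldl (fun qs t =>
    if !(PySem.Set.contains handled t) && !(PySem.Str.startswith t "Document.") then
      qs ++ ["What value should go in the '" ++ t ++ "' field?"]
    else qs) questions

-- ===== PORT B =====
structure BState where
  sp : Bool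
  se : Bool
  cp : Bool
  ce : Bool
  sb : List String
  cb : List String
  left : List String
deriving Repr, DecidableEq

def tokenInfo : PySem.Dict String (String × Option String) := PySem.Dict.ofList
  [("Sender.FirstName", ("sp", none)),
   ("Sender.LastName", ("sp", none)),
   ("Sender.Company", ("sb", some "your company name")),
   ("Sender.Address", ("sb", some "your business address")),
   ("Sender.State", ("sb", some "your state")),
   ("Sender.Phone", ("sb", some "your phone number")),
   ("Sender.City", ("sb", some "sender city")),
   ("Sender.Zip", ("sb", some "sender zip")),
   ("Sender.StreetAddress", ("sb", some "sender streetaddress")),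
   ("Sender.Email", ("se", none)),
   ("Client.FirstName", ("cp", none)),
   ("Client.LastName", ("cp", none)),
   ("Client.Company", ("cb", some "the other party's company name")),
   ("Client.Address", ("cb", some "the other party's address")),
   ("Client.State", ("cb", some "the other party's state")),
   ("Client.Phone", ("cb", some "the other party's phone number")),
   ("Client.City", ("cb", some "client city")),
   ("Client.Zip", ("cb", some "client zip")),
   ("Client.StreetAddress", ("cb", some "client streetaddress")),
   ("Client.Email", ("ce", none))]

def b_step (st : BState) (t : String) : BState :=
  match PySem.Dict.get? tokenInfo t with
  | none =>
    if !(PySem.Str.startswith t "Document.") then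
      { st with left := st.left ++ ["What value should go in the '" ++ t ++ "' field?"] }
    else st
  | some (bucket, label) =>
    if bucket == "sp" then { st with sp := true }
    else if bucket == "sb" then { st with sb := st.sb ++ [label.getD ""] }
    else if bucket == "se" then { st with se := true }
    else if bucket == "cp" then { st with cp := true }
    else if bucket == "cb" then { st with cb := st.cb ++ [label.getD ""] }
    else { st with ce := true }

def build_missing_token_questions_py_alt (missing : List String) : List String :=
  let st := missing.foldl b_step ⟨false, false, false, false, [], [], []⟩
  let questions : List String := []
  let questions := if st.sp then
    questions ++ ["What is your full name (for the sender fields on the document)?"] else questions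
  let questions := if st.sb.isEmpty then questions else
    questions ++ ["I need " ++ PySem.Str.join ", " st.sb ++ ". Should I use your business profile info, or would you like to provide different details?"]
  let questions := if st.se then
    questions ++ ["What email address should appear on the document for you?"] else questions
  let questions := if st.cp then
    questions ++ ["Who is the contact person (signer) at the other company?"] else questions
  let questions := if st.cb.isEmpty then questions else
    questions ++ ["I also need the other party's: " ++ PySem.Str.join ", " st.cb ++ "."]
  let questions := if st.ce then
    questions ++ ["What is the other party's email address?"] else questions
  questions ++ st.left

-- ===== PRECONDITION & SPEC =====
def Spec_build_missing_token_questions_py (missing : List String) (out : List String) : Prop := out = build_missing_token_questions_py_alt missing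
instance (missing : List String) (out : List String) : Decidable (Spec_build_missing_token_questions_py missing out) := by unfold Spec_build_missing_token_questions_py; infer_instance

-- ===== CLAIM (what is proved, stated in full; the proofs are below) =====
def Claim_equal_build_missing_token_questions_py : Prop := ∀ (missing : List String), Dom_build_missing_token_questions_py missing → Spec_build_missing_token_questions_py missing (build_missing_token_questions_py missing)

-- ===== LEMMAS AND PROOFS =====
def pSp (t : String) : Bool := t == "Sender.FirstName" || t == "Sender.LastName"
def pSb (t : String) : Bool := t == "Sender.Company" || t == "Sender.Address" ||
  t == "Sender.State" || t == "Sender.Phone" || t == "Sender.City" || t == "Sender.Zip" ||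
  t == "Sender.StreetAddress"
def pCp (t : String) : Bool := t == "Client.FirstName" || t == "Client.LastName"
def pCb (t : String) : Bool := t == "Client.Company" || t == "Client.Address" ||
  t == "Client.State" || t == "Client.Phone" || t == "Client.City" || t == "Client.Zip" ||
  t == "Client.StreetAddress"
def recogB (t : String) : Bool := pSp t || pSb t || t == "Sender.Email" || pCp t || pCb t || t == "Client.Email"
def labelOf (t : String) : String :=
  match PySem.Dict.get? tokenInfo t with
  | some (_, l) => l.getD ""
  | none => ""
def fmtLeft (t : String) : String := "What value should go in the '" ++ t ++ "' field?"
def pLeft (t : String) : Bool := !recogB t && !PySem.Str.startswith t "Document."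
theorem b_step_eq (st : BState) (t : String) : b_step st t =
    ⟨st.sp || pSp t, st.se || (t == "Sender.Email"), st.cp || pCp t, st.ce || (t == "Client.Email"),
     st.sb ++ (if pSb t then [labelOf t] else []),
     st.cb ++ (if pCb t then [labelOf t] else []),
     st.left ++ (if pLeft t then [fmtLeft t] else [])⟩ := by
  by_cases h1 : t = "Sender.FirstName"
  · subst h1; simp only [b_step]
    rw [show PySem.Dict.get? tokenInfo "Sender.FirstName" = some ("sp", none) from rfl]
    simp [pSp, pSb, pCp, pCb, pLeft, recogB]
  by_cases h2 : t = "Sender.LastName"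
  · subst h2; simp only [b_step]
    rw [show PySem.Dict.get? tokenInfo "Sender.LastName" = some ("sp", none) from rfl]
    simp [pSp, pSb, pCp, pCb, pLeft, recogB]
  by_cases h3 : t = "Sender.Company"
  · subst h3; simp only [b_step]
    rw [show PySem.Dict.get? tokenInfo "Sender.Company" = some ("sb", some "your company name") from rfl]
    simp [pSp, pSb, pCp, pCb, pLeft, recogB, show labelOf "Sender.Company" = "your company name" from rfl]
  by_cases h4 : t = "Sender.Address"
  · subst h4; simp only [b_step]
    rw [show PySem.Dict.get? tokenInfo "Sender.Address" = some ("sb", some "your business address") from rfl]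
    simp [pSp, pSb, pCp, pCb, pLeft, recogB, show labelOf "Sender.Address" = "your business address" from rfl]
  by_cases h5 : t = "Sender.State"
  · subst h5; simp only [b_step]
    rw [show PySem.Dict.get? tokenInfo "Sender.State" = some ("sb", some "your state") from rfl]
    simp [pSp, pSb, pCp, pCb, pLeft, recogB, show labelOf "Sender.State" = "your state" from rfl]
  by_cases h6 : t = "Sender.Phone"
  · subst h6; simp only [b_step]
    rw [show PySem.Dict.get? tokenInfo "Sender.Phone" = some ("sb", some "your phone number") from rfl]
    simp [pSp, pSb, pCp, pCb, pLeft, recogB, show labelOf "Sender.Phone" = "your phone number" from rfl]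
  by_cases h7 : t = "Sender.City"
  · subst h7; simp only [b_step]
    rw [show PySem.Dict.get? tokenInfo "Sender.City" = some ("sb", some "sender city") from rfl]
    simp [pSp, pSb, pCp, pCb, pLeft, recogB, show labelOf "Sender.City" = "sender city" from rfl]
  by_cases h8 : t = "Sender.Zip"
  · subst h8; simp only [b_step]
    rw [show PySem.Dict.get? tokenInfo "Sender.Zip" = some ("sb", some "sender zip") from rfl]
    simp [pSp, pSb, pCp, pCb, pLeft, recogB, show labelOf "Sender.Zip" = "sender zip" from rfl]
  by_cases h9 : t = "Sender.StreetAddress"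
  · subst h9; simp only [b_step]
    rw [show PySem.Dict.get? tokenInfo "Sender.StreetAddress" = some ("sb", some "sender streetaddress") from rfl]
    simp [pSp, pSb, pCp, pCb, pLeft, recogB, show labelOf "Sender.StreetAddress" = "sender streetaddress" from rfl]
  by_cases h10 : t = "Sender.Email"
  · subst h10; simp only [b_step]
    rw [show PySem.Dict.get? tokenInfo "Sender.Email" = some ("se", none) from rfl]
    simp [pSp, pSb, pCp, pCb, pLeft, recogB]
  by_cases h11 : t = "Client.FirstName"
  · subst h11; simp only [b_step]
    rw [show PySem.Dict.get? tokenInfo "Client.FirstName" = some ("cp", none) from rfl]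
    simp [pSp, pSb, pCp, pCb, pLeft, recogB]
  by_cases h12 : t = "Client.LastName"
  · subst h12; simp only [b_step]
    rw [show PySem.Dict.get? tokenInfo "Client.LastName" = some ("cp", none) from rfl]
    simp [pSp, pSb, pCp, pCb, pLeft, recogB]
  by_cases h13 : t = "Client.Company"
  · subst h13; simp only [b_step]
    rw [show PySem.Dict.get? tokenInfo "Client.Company" = some ("cb", some "the other party's company name") from rfl]
    simp [pSp, pSb, pCp, pCb, pLeft, recogB, show labelOf "Client.Company" = "the other party's company name" from rfl]
  by_cases h14 : t = "Client.Address"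
  · subst h14; simp only [b_step]
    rw [show PySem.Dict.get? tokenInfo "Client.Address" = some ("cb", some "the other party's address") from rfl]
    simp [pSp, pSb, pCp, pCb, pLeft, recogB, show labelOf "Client.Address" = "the other party's address" from rfl]
  by_cases h15 : t = "Client.State"
  · subst h15; simp only [b_step]
    rw [show PySem.Dict.get? tokenInfo "Client.State" = some ("cb", some "the other party's state") from rfl]
    simp [pSp, pSb, pCp, pCb, pLeft, recogB, show labelOf "Client.State" = "the other party's state" from rfl]
  by_cases h16 : t = "Client.Phone"
  · subst h16; simp only [b_step]
    rw [show PySem.Dict.get? tokenInfo "Client.Phone" = some ("cb", some "the other party's phone number") from rfl]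
    simp [pSp, pSb, pCp, pCb, pLeft, recogB, show labelOf "Client.Phone" = "the other party's phone number" from rfl]
  by_cases h17 : t = "Client.City"
  · subst h17; simp only [b_step]
    rw [show PySem.Dict.get? tokenInfo "Client.City" = some ("cb", some "client city") from rfl]
    simp [pSp, pSb, pCp, pCb, pLeft, recogB, show labelOf "Client.City" = "client city" from rfl]
  by_cases h18 : t = "Client.Zip"
  · subst h18; simp only [b_step]
    rw [show PySem.Dict.get? tokenInfo "Client.Zip" = some ("cb", some "client zip") from rfl]
    simp [pSp, pSb, pCp, pCb, pLeft, recogB, show labelOf "Client.Zip" = "client zip" from rfl]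
  by_cases h19 : t = "Client.StreetAddress"
  · subst h19; simp only [b_step]
    rw [show PySem.Dict.get? tokenInfo "Client.StreetAddress" = some ("cb", some "client streetaddress") from rfl]
    simp [pSp, pSb, pCp, pCb, pLeft, recogB, show labelOf "Client.StreetAddress" = "client streetaddress" from rfl]
  by_cases h20 : t = "Client.Email"
  · subst h20; simp only [b_step]
    rw [show PySem.Dict.get? tokenInfo "Client.Email" = some ("ce", none) from rfl]
    simp [pSp, pSb, pCp, pCb, pLeft, recogB]
  have e1 : (t == "Sender.FirstName") = false := by simp [h1]
  have e2 : (t == "Sender.LastName") = false := by simp [h2]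
  have e3 : (t == "Sender.Company") = false := by simp [h3]
  have e4 : (t == "Sender.Address") = false := by simp [h4]
  have e5 : (t == "Sender.State") = false := by simp [h5]
  have e6 : (t == "Sender.Phone") = false := by simp [h6]
  have e7 : (t == "Sender.City") = false := by simp [h7]
  have e8 : (t == "Sender.Zip") = false := by simp [h8]
  have e9 : (t == "Sender.StreetAddress") = false := by simp [h9]
  have e10 : (t == "Sender.Email") = false := by simp [h10]
  have e11 : (t == "Client.FirstName") = false := by simp [h11]
  have e12 : (t == "Client.LastName") = false := by simp [h12]
  have e13 : (t == "Client.Company") = false := by simp [h13]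
  have e14 : (t == "Client.Address") = false := by simp [h14]
  have e15 : (t == "Client.State") = false := by simp [h15]
  have e16 : (t == "Client.Phone") = false := by simp [h16]
  have e17 : (t == "Client.City") = false := by simp [h17]
  have e18 : (t == "Client.Zip") = false := by simp [h18]
  have e19 : (t == "Client.StreetAddress") = false := by simp [h19]
  have e20 : (t == "Client.Email") = false := by simp [h20]
  have hget : PySem.Dict.get? tokenInfo t = none := by
    rw [show tokenInfo = PySem.Dict.mk [("Sender.FirstName", ("sp", none)), ("Sender.LastName", ("sp", none)), ("Sender.Company", ("sb", some "your company name")), ("Sender.Address", ("sb", some "your business address")), ("Sender.State", ("sb", some "your state")), ("Sender.Phone", ("sb", some "your phone number")), ("Sender.City", ("sb", some "sender city")), ("Sender.Zip", ("sb", some "sender zip")), ("Sender.StreetAddress", ("sb", some "sender streetaddress")), ("Sender.Email", ("se", none)), ("Client.FirstName", ("cp", none)), ("Client.LastName", ("cp", none)), ("Client.Company", ("cb", some "the other party's company name")), ("Client.Address", ("cb", some "the other party's address")), ("Client.State", ("cb", some "the other party's state")), ("Client.Phone", ("cb", some "the other party's phone number")), ("Client.City", ("cb", some "client city")), ("Client.Zip",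 ("cb", some "client zip")), ("Client.StreetAddress", ("cb", some "client streetaddress")), ("Client.Email", ("ce", none))] from rfl]
    simp [PySem.Dict.get?, Ne.symm h1, Ne.symm h2, Ne.symm h3, Ne.symm h4, Ne.symm h5, Ne.symm h6, Ne.symm h7, Ne.symm h8, Ne.symm h9, Ne.symm h10, Ne.symm h11, Ne.symm h12, Ne.symm h13, Ne.symm h14, Ne.symm h15, Ne.symm h16, Ne.symm h17, Ne.symm h18, Ne.symm h19, Ne.symm h20]
  simp only [b_step, hget]
  cases hS : PySem.Chars.startswith t.toList ['D', 'o', 'c', 'u', 'm', 'e', 'n', 't', '.'] <;>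
    simp [pSp, pSb, pCp, pCb, pLeft, recogB, fmtLeft, hS, e1, e2, e3, e4, e5, e6, e7, e8, e9, e10, e11, e12, e13, e14, e15, e16, e17, e18, e19, e20]
theorem fold_char (l : List String) (st : BState) :
    l.foldl b_step st =
      ⟨st.sp || l.any pSp, st.se || l.any (· == "Sender.Email"),
       st.cp || l.any pCp, st.ce || l.any (· == "Client.Email"),
       st.sb ++ (l.filter pSb).map labelOf, st.cb ++ (l.filter pCb).map labelOf,
       st.left ++ (l.filter pLeft).map fmtLeft⟩ := by
  induction l generalizing st with
  | nil => simp
  | cons t rest ih =>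
    rw [List.foldl_cons, b_step_eq, ih]
    simp [List.filter_cons, Bool.or_assoc]
    split_ifs <;> simp

theorem humanize_sb (t : String) (h : pSb t = true) : humanize_token_name_py t = labelOf t := by
  simp [pSb] at h
  rcases h with ((((((h|h)|h)|h)|h)|h)|h) <;> subst h <;> decide

theorem humanize_cb (t : String) (h : pCb t = true) : humanize_token_name_py t = labelOf t := by
  simp [pCb] at h
  rcases h with ((((((h|h)|h)|h)|h)|h)|h) <;> subst h <;> decide

theorem handled_contains (missing : List String) (t : String) (ht : t ∈ missing) :
    PySem.Set.contains
      (PySem.Set.update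
        (PySem.Set.ofList (missing.filter pSp ++ missing.filter pSb ++ missing.filter pCp ++ missing.filter pCb))
        ["Sender.Email", "Client.Email"]) t = recogB t := by
  rw [PySem.Set.contains_eq_decide, Bool.eq_iff_iff]
  simp [PySem.Set.mem_ofList, List.mem_append, List.mem_filter, ht, recogB]
  tauto
theorem filter_isEmpty (l : List String) (p : String → Bool) : (l.filter p).isEmpty = !l.any p := by
  rw [Bool.eq_iff_iff]
  simp [List.isEmpty_iff, List.filter_eq_nil_iff]

-- ===== VERDICT (by name: the statement is the Claim_ definition above) =====
theorem build_missing_token_questions_py_spec : Claim_equal_build_missing_token_questions_py := by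
  intro missing _
  unfold Spec_build_missing_token_questions_py
  simp only [build_missing_token_questions_py, build_missing_token_questions_py_alt]
  rw [fold_char]
  rw [show (fun t => t == "Sender.FirstName" || t == "Sender.LastName") = pSp from rfl]
  rw [show (fun t => t == "Sender.Company" || t == "Sender.Address" ||
    t == "Sender.State" || t == "Sender.Phone" || t == "Sender.City" || t == "Sender.Zip" ||
    t == "Sender.StreetAddress") = pSb from rfl]
  rw [show (fun t => t == "Client.FirstName" || t == "Client.LastName") = pCp from rfl]
  rw [show (fun t => t == "Client.Company" || t == "Client.Address" ||
    t == "Client.State" || t == "Client.Phone" || t == "Client.City" || t == "Client.Zip" ||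
    t == "Client.StreetAddress") = pCb from rfl]
  simp only [List.nil_append, Bool.false_or, filter_isEmpty, List.isEmpty_map, List.any_beq']
  rw [List.map_congr_left (fun t ht => humanize_sb t (List.of_mem_filter ht)),
      List.map_congr_left (fun t ht => humanize_cb t (List.of_mem_filter ht))]
  rw [PySem.List.foldl_append_if]
  rw [List.filter_congr (q := pLeft)
    (p := fun t => !PySem.Set.contains
      (PySem.Set.update (PySem.Set.ofList (missing.filter pSp ++ missing.filter pSb ++
        missing.filter pCp ++ missing.filter pCb)) ["Sender.Email", "Client.Email"]) t &&
      !PySem.Str.startswith t "Document.")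
    (fun t ht => by beta_reduce; rw [handled_contains missing t ht]; rfl)]
  cases h1 : missing.any pSp <;> cases h2 : missing.any pSb <;>
    cases h3 : missing.contains "Sender.Email" <;> cases h4 : missing.any pCp <;>
    cases h5 : missing.any pCb <;> cases h6 : missing.contains "Client.Email" <;>
    simp [h1, h2, h3, h4, h5, h6, fmtLeft]
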